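-- pv_equiv track=rewrite | github.com/shruthiguruprasad/smart-meter-forecasting | src/features/splitters.py | _build_feature_groups
-- ===== SOURCE A (Python) =====
-- def _build_feature_groups(feature_cols: list, static_cols: list = None, group_cols: list = None) -> dict:
--     """
--     Given a list of feature column names, plus lists of any "static" (household-level)
--     and "group" (cluster-level) column names, return a dictionary mapping
--     feature-group names to lists of columns belonging to each group.
--
--     Adjust the patterns below to match your actual column naming conventions.
--     """
--     feature_groups = {}
--
--     # 1) Temporal features: common columns added by create_all_temporal_features
--     temporal_patterns = ["dayofweek", "is_weekend", "is_holiday", "month", "day_of_year", "quarter"]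
--     temporal_cols = [
--         c for c in feature_cols
--         if any(pat == c or c.startswith(pat + "_") for pat in temporal_patterns)
--     ]
--     feature_groups["temporal"] = temporal_cols
--
--     # 2) Weather features: common names from create_all_weather_features
--     weather_patterns = ["temp", "temperature", "heating_degree", "cooling_degree", "precip", "rain", "snow"]
--     weather_cols = [c for c in feature_cols if any(pat in c for pat in weather_patterns)]
--     feature_groups["weather"] = weather_cols
--
--     # 3) Lag features: columns starting with "lag"
--     lag_cols = [c for c in feature_cols if c.startswith("lag")]
--     feature_groups["lags"] = lag_cols
--
--     # 4) Rolling window features: columns starting with "roll"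
--     roll_cols = [c for c in feature_cols if c.startswith("roll")]
--     feature_groups["rolling"] = roll_cols
--
--     # 5) Interaction features
--     interaction_patterns = ["lag1_weekend", "lag1_holiday", "lag1_summer",
--                             "lag7_weekend", "lag7_holiday", "lag7_summer"]
--     interaction_cols = [c for c in feature_cols if any(c.startswith(pat) for pat in interaction_patterns)]
--     feature_groups["interactions"] = interaction_cols
--
--     # 6) Static household metadata (e.g., "Acorn_grouped", "stdorToU", etc.)
--     if static_cols:
--         static_household_cols = [c for c in feature_cols if c in static_cols]
--     else:
--         static_household_cols = []
--     feature_groups["static_household"] = static_household_cols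
--
--     # 7) Static group/cluster metadata, if provided
--     if group_cols:
--         static_group_cols = [c for c in feature_cols if c in group_cols]
--     else:
--         static_group_cols = []
--     feature_groups["static_group"] = static_group_cols
--
--     # 8) Any remaining features that didn't match above patterns
--     assigned = set(sum(feature_groups.values(), []))
--     other_cols = [c for c in feature_cols if c not in assigned]
--     feature_groups["other"] = other_cols
--
--     return feature_groups
-- ===== SOURCE B (Python) =====
-- TEMPORAL_PATTERNS = ["dayofweek", "is_weekend", "is_holiday", "month", "day_of_year", "quarter"]
-- WEATHER_PATTERNS = ["temp", "temperature", "heating_degree", "cooling_degree", "precip", "rain", "snow"]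
-- INTERACTION_PATTERNS = ["lag1_weekend", "lag1_holiday", "lag1_summer",
--                         "lag7_weekend", "lag7_holiday", "lag7_summer"]
--
--
-- def _build_feature_groups(feature_cols: list, static_cols: list = None, group_cols: list = None) -> dict:
--     """Single pass: classify each column into every group it matches; 'other' if none."""
--     groups = {k: [] for k in ("temporal", "weather", "lags", "rolling",
--                               "interactions", "static_household", "static_group", "other")}
--     for c in feature_cols:
--         m_temporal = any(p == c or c.startswith(p + "_") for p in TEMPORAL_PATTERNS)
--         m_weather = any(p in c for p in WEATHER_PATTERNS)
--         m_lag = c.startswith("lag")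
--         m_roll = c.startswith("roll")
--         m_inter = any(c.startswith(p) for p in INTERACTION_PATTERNS)
--         m_static = bool(static_cols) and c in static_cols
--         m_group = bool(group_cols) and c in group_cols
--         if m_temporal:
--             groups["temporal"].append(c)
--         if m_weather:
--             groups["weather"].append(c)
--         if m_lag:
--             groups["lags"].append(c)
--         if m_roll:
--             groups["rolling"].append(c)
--         if m_inter:
--             groups["interactions"].append(c)
--         if m_static:
--             groups["static_household"].append(c)
--         if m_group:
--             groups["static_group"].append(c)
--         if not (m_temporal or m_weather or m_lag or m_roll or m_inter or m_static or m_group):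
--             groups["other"].append(c)
--     return groups
-- ===== Notes on version B (the rewrite author's own statement) =====
-- stated objective: alternative
-- what changed: Replaces A's eight separate whole-list scans plus a final set-difference pass over feature_cols with a single element-by-element pass that appends each column to every matching group and to 'other' when nothing matched.
import Mathlib
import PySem

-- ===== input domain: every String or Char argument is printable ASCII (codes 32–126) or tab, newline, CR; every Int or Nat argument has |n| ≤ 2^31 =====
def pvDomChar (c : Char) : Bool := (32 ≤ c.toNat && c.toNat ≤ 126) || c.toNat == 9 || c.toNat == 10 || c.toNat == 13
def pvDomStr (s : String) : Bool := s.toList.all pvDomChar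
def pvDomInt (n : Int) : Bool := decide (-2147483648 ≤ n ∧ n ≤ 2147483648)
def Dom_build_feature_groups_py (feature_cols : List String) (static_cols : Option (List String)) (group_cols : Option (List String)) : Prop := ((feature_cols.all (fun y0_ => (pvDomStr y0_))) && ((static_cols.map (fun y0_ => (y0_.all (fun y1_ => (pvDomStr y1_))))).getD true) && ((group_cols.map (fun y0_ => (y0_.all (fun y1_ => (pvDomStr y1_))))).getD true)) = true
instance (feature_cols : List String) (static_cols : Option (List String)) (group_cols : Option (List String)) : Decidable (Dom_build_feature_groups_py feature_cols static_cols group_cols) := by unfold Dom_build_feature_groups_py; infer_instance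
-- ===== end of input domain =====

-- B changes the decomposition: A makes eight whole-list scans plus a set-difference pass;
-- B classifies each column once in a single pass (objective: alternative, same cost).

-- Pattern lists and the per-column tests, shared verbatim by both Python versions.
def pvTemporalPats : List String :=
  ["dayofweek", "is_weekend", "is_holiday", "month", "day_of_year", "quarter"]
def pvWeatherPats : List String :=
  ["temp", "temperature", "heating_degree", "cooling_degree", "precip", "rain", "snow"]
def pvInterPats : List String :=
  ["lag1_weekend", "lag1_holiday", "lag1_summer", "lag7_weekend", "lag7_holiday", "lag7_summer"]

def pvIsTemporal (c : String) : Bool :=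
  pvTemporalPats.any (fun p => p == c || PySem.Str.startswith c (p ++ "_"))
def pvIsWeather (c : String) : Bool :=
  pvWeatherPats.any (fun p => PySem.Str.isIn p c)
def pvIsInter (c : String) : Bool :=
  pvInterPats.any (fun p => PySem.Str.startswith c p)

-- ===== PORT A =====
-- The dict's eight keys are distinct string literals, so the dict is the association
-- list of the eight (key, value) pairs in insertion order; 'if static_cols:' is the
-- Python truthiness test (None and [] falsy).
def build_feature_groups_py (feature_cols : List String) (static_cols : Option (List String)) (group_cols : Option (List String)) : List (String × List String) :=
  let temporal := feature_cols.filter pvIsTemporal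
  let weather := feature_cols.filter pvIsWeather
  let lags := feature_cols.filter (fun c => PySem.Str.startswith c "lag")
  let rolling := feature_cols.filter (fun c => PySem.Str.startswith c "roll")
  let inter := feature_cols.filter pvIsInter
  let statich :=
    match static_cols with
    | none => []
    | some l => if l.isEmpty then [] else feature_cols.filter (fun c => l.contains c)
  let staticg :=
    match group_cols with
    | none => []
    | some l => if l.isEmpty then [] else feature_cols.filter (fun c => l.contains c)
  -- assigned = set(sum(feature_groups.values(), []))
  let assigned : PySem.Set String :=
    PySem.Set.ofList (temporal ++ weather ++ lags ++ rolling ++ inter ++ statich ++ staticg)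
  let other := feature_cols.filter (fun c => !(PySem.Set.contains assigned c))
  [("temporal", temporal), ("weather", weather), ("lags", lags), ("rolling", rolling),
   ("interactions", inter), ("static_household", statich), ("static_group", staticg),
   ("other", other)]

-- ===== PORT B =====
-- bool(opt) and c in opt
def pvTruthyMem (oc : Option (List String)) (c : String) : Bool :=
  match oc with
  | none => false
  | some l => !l.isEmpty && l.contains c

-- one iteration of B's loop body over the 8-list state
def pvStep (sc gc : Option (List String))
    (g : List String × List String × List String × List String × List String × List String × List String × List String)
    (c : String) :
    List String × List String × List String × List String × List String × List String × List String × List String :=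
  let m1 := pvIsTemporal c
  let m2 := pvIsWeather c
  let m3 := PySem.Str.startswith c "lag"
  let m4 := PySem.Str.startswith c "roll"
  let m5 := pvIsInter c
  let m6 := pvTruthyMem sc c
  let m7 := pvTruthyMem gc c
  ((if m1 then g.1 ++ [c] else g.1),
   (if m2 then g.2.1 ++ [c] else g.2.1),
   (if m3 then g.2.2.1 ++ [c] else g.2.2.1),
   (if m4 then g.2.2.2.1 ++ [c] else g.2.2.2.1),
   (if m5 then g.2.2.2.2.1 ++ [c] else g.2.2.2.2.1),
   (if m6 then g.2.2.2.2.2.1 ++ [c] else g.2.2.2.2.2.1),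
   (if m7 then g.2.2.2.2.2.2.1 ++ [c] else g.2.2.2.2.2.2.1),
   (if !(m1 || m2 || m3 || m4 || m5 || m6 || m7) then g.2.2.2.2.2.2.2 ++ [c] else g.2.2.2.2.2.2.2))

def build_feature_groups_py_alt (feature_cols : List String) (static_cols : Option (List String)) (group_cols : Option (List String)) : List (String × List String) :=
  let r := feature_cols.foldl (pvStep static_cols group_cols) ([], [], [], [], [], [], [], [])
  [("temporal", r.1), ("weather", r.2.1), ("lags", r.2.2.1), ("rolling", r.2.2.2.1),
   ("interactions", r.2.2.2.2.1), ("static_household", r.2.2.2.2.2.1),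
   ("static_group", r.2.2.2.2.2.2.1), ("other", r.2.2.2.2.2.2.2)]

-- ===== PRECONDITION & SPEC =====
def Spec_build_feature_groups_py (feature_cols : List String) (static_cols : Option (List String)) (group_cols : Option (List String)) (out : List (String × List String)) : Prop := out = build_feature_groups_py_alt feature_cols static_cols group_cols
instance (feature_cols : List String) (static_cols : Option (List String)) (group_cols : Option (List String)) (out : List (String × List String)) : Decidable (Spec_build_feature_groups_py feature_cols static_cols group_cols out) := by unfold Spec_build_feature_groups_py; infer_instance

-- ===== CLAIM (what is proved, stated in full; the proofs are below) =====
def Claim_equal_build_feature_groups_py : Prop := ∀ (feature_cols : List String) (static_cols : Option (List String)) (group_cols : Option (List String)), Dom_build_feature_groups_py feature_cols static_cols group_cols → Spec_build_feature_groups_py feature_cols static_cols group_cols (build_feature_groups_py feature_cols static_cols group_cols)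

-- ===== LEMMAS AND PROOFS =====

-- appending one element (conditionally) commutes with filtering the tail
lemma pv_append_if (p : String → Bool) (a : List String) (x : String) (xs : List String) :
    (if p x then a ++ [x] else a) ++ xs.filter p = a ++ (x :: xs).filter p := by
  by_cases h : p x <;> simp [h]

-- B's fold, started from arbitrary accumulators, computes the eight filters
lemma pvStep_foldl (sc gc : Option (List String)) (fc : List String)
    (t w l r i s g o : List String) :
    fc.foldl (pvStep sc gc) (t, w, l, r, i, s, g, o) =
      (t ++ fc.filter pvIsTemporal,
       w ++ fc.filter pvIsWeather,
       l ++ fc.filter (fun c => PySem.Str.startswith c "lag"),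
       r ++ fc.filter (fun c => PySem.Str.startswith c "roll"),
       i ++ fc.filter pvIsInter,
       s ++ fc.filter (fun c => pvTruthyMem sc c),
       g ++ fc.filter (fun c => pvTruthyMem gc c),
       o ++ fc.filter (fun c => !(pvIsTemporal c || pvIsWeather c || PySem.Str.startswith c "lag" || PySem.Str.startswith c "roll" || pvIsInter c || pvTruthyMem sc c || pvTruthyMem gc c))) := by
  induction fc generalizing t w l r i s g o with
  | nil => simp
  | cons x xs ih =>
    rw [List.foldl_cons, pvStep, ih]
    dsimp only
    refine congrArg₂ _ (pv_append_if pvIsTemporal t x xs) ?_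
    refine congrArg₂ _ (pv_append_if pvIsWeather w x xs) ?_
    refine congrArg₂ _ (pv_append_if (fun c => PySem.Str.startswith c "lag") l x xs) ?_
    refine congrArg₂ _ (pv_append_if (fun c => PySem.Str.startswith c "roll") r x xs) ?_
    refine congrArg₂ _ (pv_append_if pvIsInter i x xs) ?_
    refine congrArg₂ _ (pv_append_if (fun c => pvTruthyMem sc c) s x xs) ?_
    exact congrArg₂ _ (pv_append_if (fun c => pvTruthyMem gc c) g x xs)
      (pv_append_if (fun c => !(pvIsTemporal c || pvIsWeather c || PySem.Str.startswith c "lag" || PySem.Str.startswith c "roll" || pvIsInter c || pvTruthyMem sc c || pvTruthyMem gc c)) o x xs)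

-- A's truthiness-guarded membership filter is the filter by pvTruthyMem
lemma pv_static_eq (oc : Option (List String)) (fc : List String) :
    (match oc with
     | none => []
     | some l => if l.isEmpty then [] else fc.filter (fun c => l.contains c)) =
      fc.filter (fun c => pvTruthyMem oc c) := by
  match oc with
  | none => simp [pvTruthyMem]
  | some [] => simp [pvTruthyMem]
  | some (x :: l) => simp [pvTruthyMem]

-- ===== VERDICT (by name: the statement is the Claim_ definition above) =====
theorem build_feature_groups_py_spec : Claim_equal_build_feature_groups_py := by
  intro fc sc gc _
  unfold Spec_build_feature_groups_py build_feature_groups_py build_feature_groups_py_alt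
  rw [pvStep_foldl]
  simp only [List.nil_append]
  rw [pv_static_eq sc fc, pv_static_eq gc fc]
  have hother :
      fc.filter (fun c => !(PySem.Set.contains
        (PySem.Set.ofList (fc.filter pvIsTemporal ++ fc.filter pvIsWeather ++
          fc.filter (fun c => PySem.Str.startswith c "lag") ++
          fc.filter (fun c => PySem.Str.startswith c "roll") ++
          fc.filter pvIsInter ++ fc.filter (fun c => pvTruthyMem sc c) ++
          fc.filter (fun c => pvTruthyMem gc c))) c)) =
      fc.filter (fun c => !(pvIsTemporal c || pvIsWeather c || PySem.Str.startswith c "lag" || PySem.Str.startswith c "roll" || pvIsInter c || pvTruthyMem sc c || pvTruthyMem gc c)) := by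
    apply List.filter_congr
    intro c hc
    have : PySem.Set.contains
        (PySem.Set.ofList (fc.filter pvIsTemporal ++ fc.filter pvIsWeather ++
          fc.filter (fun c => PySem.Str.startswith c "lag") ++
          fc.filter (fun c => PySem.Str.startswith c "roll") ++
          fc.filter pvIsInter ++ fc.filter (fun c => pvTruthyMem sc c) ++
          fc.filter (fun c => pvTruthyMem gc c))) c =
        (pvIsTemporal c || pvIsWeather c || PySem.Str.startswith c "lag" || PySem.Str.startswith c "roll" || pvIsInter c || pvTruthyMem sc c || pvTruthyMem gc c) := by
      rw [Bool.eq_iff_iff]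
      simp [PySem.Set.mem_ofList, List.mem_append, List.mem_filter, hc]
      tauto
    rw [this]
  rw [hother]
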